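-- pv_equiv track=rewrite | github.com/SebastianDelgad/Trabajo-de-Grado | backend/LeerObservaciones.py | almacenar_nombres
-- ===== SOURCE A (Python) =====
-- def almacenar_nombres(datos):
--     vectorNombres = []
--
--     grupos = ["M 50", "M 51", "M 52", "M 53", "M 54",
--               "M 55", "M 56", "M 57", "M 58", "M 59", "M 60"]
--
--     for nombre in datos:
--         if len(nombre) > 18:
--             grupoPDF = nombre[len(nombre) - 4] + "" + nombre[len(nombre) - 3] + \
--                 "" + nombre[len(nombre) - 2] + "" + nombre[len(nombre) - 1]
--             for grupo in grupos:
--                 if grupoPDF == grupo: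
--                     vectorNombres.append(nombre)
--
--     return vectorNombres
-- ===== SOURCE B (Python) =====
-- def almacenar_nombres(datos):
--     def keep(nombre):
--         if len(nombre) <= 18:
--             return False
--         suf = nombre[-4:]
--         return suf[:2] == "M " and suf[2:].isdigit() and 50 <= int(suf[2:]) <= 60
--     return [nombre for nombre in datos if keep(nombre)]
-- ===== Notes on version B (the rewrite author's own statement) =====
-- stated objective: simpler
-- what changed: Replaces the 11-entry lookup table and the inner membership loop over it with a direct closed-form test of the 4-char suffix: prefix 'M ' plus a digit check and an inclusive numeric range test 50..60, selecting via a single filter pass.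
import Mathlib
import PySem

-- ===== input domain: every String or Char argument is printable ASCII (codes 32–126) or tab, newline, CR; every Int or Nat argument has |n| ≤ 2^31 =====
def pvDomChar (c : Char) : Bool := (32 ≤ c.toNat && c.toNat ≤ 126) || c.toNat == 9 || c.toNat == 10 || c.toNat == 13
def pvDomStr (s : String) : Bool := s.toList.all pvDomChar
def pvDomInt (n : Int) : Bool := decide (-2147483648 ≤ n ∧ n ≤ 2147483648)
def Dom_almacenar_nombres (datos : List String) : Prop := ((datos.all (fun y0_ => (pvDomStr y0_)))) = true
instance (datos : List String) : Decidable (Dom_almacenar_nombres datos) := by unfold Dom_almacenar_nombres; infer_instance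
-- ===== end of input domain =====

-- B replaces A's 11-entry lookup table and inner membership loop by a direct check of the
-- 4-char suffix: prefix "M " plus a numeric range test 50 ≤ int(suffix) ≤ 60 (objective: simpler).

-- ===== PORT A =====
def gruposA : List String :=
  ["M 50", "M 51", "M 52", "M 53", "M 54", "M 55", "M 56", "M 57", "M 58", "M 59", "M 60"]

-- loop body of A's 'for nombre in datos' (Python s[i] + s[j] + … built as the 4-char list)
def stepA (vectorNombres : List String) (nombre : String) : List String :=
  let cs := nombre.toList
  if 18 < cs.length then
    match PySem.List.pyGet? cs ((cs.length : Int) - 4), PySem.List.pyGet? cs ((cs.length : Int) - 3),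
          PySem.List.pyGet? cs ((cs.length : Int) - 2), PySem.List.pyGet? cs ((cs.length : Int) - 1) with
    | some c1, some c2, some c3, some c4 =>
      gruposA.foldl
        (fun acc grupo => if [c1, c2, c3, c4] == grupo.toList then acc ++ [nombre] else acc)
        vectorNombres
    | _, _, _, _ => vectorNombres  -- unreachable: all four indices are in range when len > 18
  else vectorNombres

def almacenar_nombres (datos : List String) : List String :=
  datos.foldl stepA []

-- ===== PORT B =====
def keep_alt (nombre : String) : Bool :=
  let cs := nombre.toList
  if cs.length ≤ 18 then false
  else
    let suf := PySem.List.slice cs (some (-4)) none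
    (PySem.List.slice suf none (some 2) == ['M', ' ']) &&
      PySem.Chars.strIsdigit (PySem.List.slice suf (some 2) none) &&
      (match PySem.Int.ofChars? (PySem.List.slice suf (some 2) none) with
       | some v => decide (50 ≤ v) && decide (v ≤ 60)
       | none => false)

def almacenar_nombres_alt (datos : List String) : List String :=
  datos.filter keep_alt

-- ===== PRECONDITION & SPEC =====
def Spec_almacenar_nombres (datos : List String) (out : List String) : Prop := out = almacenar_nombres_alt datos
instance (datos : List String) (out : List String) : Decidable (Spec_almacenar_nombres datos out) := by unfold Spec_almacenar_nombres; infer_instance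

-- ===== CLAIM (what is proved, stated in full; the proofs are below) =====
def Claim_equal_almacenar_nombres : Prop := ∀ (datos : List String), Dom_almacenar_nombres datos → Spec_almacenar_nombres datos (almacenar_nombres datos)

-- ===== LEMMAS AND PROOFS =====

lemma digit_cases (c : Char) (h : PySem.Chars.isdigit c = true) :
    c = '0' ∨ c = '1' ∨ c = '2' ∨ c = '3' ∨ c = '4' ∨ c = '5' ∨ c = '6' ∨ c = '7' ∨ c = '8' ∨ c = '9' := by
  simp [PySem.Chars.isdigit, Char.le_def] at h
  have h1 : 48 ≤ c.toNat := h.1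
  have h2 : c.toNat ≤ 57 := h.2
  have hc := Char.ofNat_toNat c
  interval_cases hn : c.toNat <;> rw [← hc] <;> decide

lemma foldl_no_match (gs : List String) (g : List Char) (n : String) (acc : List String)
    (h : ∀ grupo ∈ gs, (g == grupo.toList) = false) :
    gs.foldl (fun a grupo => if g == grupo.toList then a ++ [n] else a) acc = acc := by
  induction gs generalizing acc with
  | nil => rfl
  | cons x xs ih =>
    rw [List.foldl_cons, if_neg (by simp [h x (by simp)])]
    exact ih acc fun grupo hm => h _ (by simp [hm])

-- the suffix of a ≥4-element list, as its four last elements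
lemma drop_last4 (cs : List Char) (h : 4 ≤ cs.length) :
    ∃ a b c d, cs.drop (cs.length - 4) = [a, b, c, d] := by
  have hlen : (cs.drop (cs.length - 4)).length = 4 := by simp; omega
  rcases e : cs.drop (cs.length - 4) with _ | ⟨a, _ | ⟨b, _ | ⟨c, _ | ⟨d, rest⟩⟩⟩⟩ <;>
    rw [e] at hlen <;> simp at hlen
  subst hlen
  exact ⟨a, b, c, d, rfl⟩

lemma step_eq (acc : List String) (nombre : String) :
    stepA acc nombre = acc ++ (if keep_alt nombre then [nombre] else []) := by
  by_cases hlen : 18 < nombre.toList.length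
  · -- long name: compare the two suffix tests
    obtain ⟨a, b, c, d, e⟩ := drop_last4 nombre.toList (by omega)
    have hsuf : PySem.List.slice nombre.toList (some (-4)) none = [a, b, c, d] := by
      rw [PySem.List.slice_from_neg_ofNat nombre.toList 4 (by omega), e]
    -- the four indexings of A all hit the dropped suffix
    have hget : ∀ k : Nat, k < 4 →
        PySem.List.pyGet? nombre.toList ((nombre.toList.length : Int) - 4 + k) = [a, b, c, d][k]? := by
      intro k hk
      have h1 : ((nombre.toList.length : Int) - 4 + k) = ((nombre.toList.length - 4 + k : Nat) : Int) := by omega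
      rw [h1, PySem.List.pyGet?_natCast, ← List.getElem?_drop, e]
    have hk : keep_alt nombre =
        (([a, b] == ['M', ' ']) && PySem.Chars.strIsdigit [c, d] &&
          (match PySem.Int.ofChars? [c, d] with
           | some v => decide (50 ≤ v) && decide (v ≤ 60)
           | none => false)) := by
      simp only [keep_alt]
      rw [if_neg (show ¬(nombre.toList.length ≤ 18) by omega), hsuf]
      rfl
    have hA : stepA acc nombre =
        gruposA.foldl (fun a' grupo => if [a, b, c, d] == grupo.toList then a' ++ [nombre] else a') acc := by
      unfold stepA
      rw [if_pos hlen]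
      have e4 : (nombre.toList.length : Int) - 4 = (nombre.toList.length : Int) - 4 + (0 : Nat) := by omega
      have e3 : (nombre.toList.length : Int) - 3 = (nombre.toList.length : Int) - 4 + (1 : Nat) := by omega
      have e2 : (nombre.toList.length : Int) - 2 = (nombre.toList.length : Int) - 4 + (2 : Nat) := by omega
      have e1 : (nombre.toList.length : Int) - 1 = (nombre.toList.length : Int) - 4 + (3 : Nat) := by omega
      rw [e4, e3, e2, e1, hget 0 (by omega), hget 1 (by omega), hget 2 (by omega), hget 3 (by omega)]
      rfl
    rw [hA, hk]
    by_cases hab : ([a, b] == ['M', ' ']) = true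
    · have hab' : a = 'M' ∧ b = ' ' := by simpa using hab
      obtain ⟨rfl, rfl⟩ := hab'
      by_cases hc : PySem.Chars.isdigit c = true
      · by_cases hd : PySem.Chars.isdigit d = true
        · rcases digit_cases c hc with rfl|rfl|rfl|rfl|rfl|rfl|rfl|rfl|rfl|rfl <;>
            rcases digit_cases d hd with rfl|rfl|rfl|rfl|rfl|rfl|rfl|rfl|rfl|rfl <;> simp [gruposA] <;> decide
        · -- d is not a digit: no grupo matches, and B's isdigit test fails
          have hd' : PySem.Chars.isdigit d = false := by simpa using hd
          rw [foldl_no_match _ _ _ _ ?_]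
          · simp [PySem.Chars.strIsdigit, hd']
          · intro grupo hg
            rw [Bool.eq_false_iff]
            intro hb
            have hlist : ['M', ' ', c, d] = grupo.toList := by simpa using hb
            fin_cases hg <;> simp at hlist <;> rw [hlist.2] at hd' <;> exact absurd hd' (by decide)
      · -- c is not a digit: no grupo matches, and B's isdigit test fails
        have hc' : PySem.Chars.isdigit c = false := by simpa using hc
        rw [foldl_no_match _ _ _ _ ?_]
        · simp [PySem.Chars.strIsdigit, hc']
        · intro grupo hg
          rw [Bool.eq_false_iff]
          intro hb
          have hlist : ['M', ' ', c, d] = grupo.toList := by simpa using hb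
          fin_cases hg <;> simp at hlist <;> rw [hlist.1] at hc' <;> exact absurd hc' (by decide)
    · -- the suffix does not start with "M ": no grupo matches either
      rw [foldl_no_match _ _ _ _ ?_]
      · simp [hab]
      · intro grupo hg
        rw [Bool.eq_false_iff]
        intro hb
        have hlist : [a, b, c, d] = grupo.toList := by simpa using hb
        fin_cases hg <;> simp at hlist <;> exact hab (by simp [hlist.1, hlist.2.1])
  · -- short name: A skips it and B's guard rejects it
    have h1 : stepA acc nombre = acc := by
      simp only [stepA]; rw [if_neg hlen]
    have h2 : keep_alt nombre = false := by
      simp only [keep_alt]; rw [if_pos (show nombre.toList.length ≤ 18 by omega)]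
    rw [h1, h2]; simp

lemma fold_eq (datos : List String) (acc : List String) :
    datos.foldl stepA acc = acc ++ datos.filter keep_alt := by
  induction datos generalizing acc with
  | nil => simp
  | cons x xs ih =>
    rw [List.foldl_cons, step_eq, ih, List.filter_cons]
    cases hk : keep_alt x <;> simp

-- ===== VERDICT (by name: the statement is the Claim_ definition above) =====
theorem almacenar_nombres_spec : Claim_equal_almacenar_nombres := by
  intro datos _
  unfold Spec_almacenar_nombres almacenar_nombres almacenar_nombres_alt
  rw [fold_eq]
  simp
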